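-- pv_equiv track=rewrite | github.com/dleemiller/CnakeCharmer | cnake_data/unpaired/lane_pixel_histogram.py | column_histogram
-- ===== SOURCE A (Python) =====
-- def column_histogram(binary_img: list[list[int]]) -> list[int]:
--     h = len(binary_img)
--     if h == 0:
--         return []
--     w = len(binary_img[0])
--     hist = [0] * w
--     for y in range(h):
--         row = binary_img[y]
--         for x in range(w):
--             if row[x]:
--                 hist[x] += 1
--     return hist
-- ===== SOURCE B (Python) =====
-- def column_histogram(binary_img: list[list[int]]) -> list[int]:
--     return [sum(1 for v in col if v) for col in zip(*binary_img)]
-- ===== Notes on version B (the rewrite author's own statement) =====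
-- stated objective: idiomatic
-- what changed: B transposes the image with zip(*binary_img) and reduces each column independently in a comprehension (column-major gather-then-reduce), instead of A's row-major double loop scattering increments into a mutable accumulator array.
import Mathlib
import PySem

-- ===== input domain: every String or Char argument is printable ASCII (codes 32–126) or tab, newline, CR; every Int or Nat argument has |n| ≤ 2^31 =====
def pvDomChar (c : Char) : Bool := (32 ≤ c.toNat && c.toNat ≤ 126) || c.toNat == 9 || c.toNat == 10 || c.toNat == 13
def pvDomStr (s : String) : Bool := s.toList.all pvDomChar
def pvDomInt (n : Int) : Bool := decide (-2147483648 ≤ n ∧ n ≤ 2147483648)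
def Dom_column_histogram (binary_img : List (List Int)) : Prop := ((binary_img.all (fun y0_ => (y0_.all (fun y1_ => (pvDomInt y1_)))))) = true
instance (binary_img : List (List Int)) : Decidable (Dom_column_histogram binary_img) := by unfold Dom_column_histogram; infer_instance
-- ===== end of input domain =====

-- B gathers each column by transposition (zip(*img)) and reduces each column, instead of A's row-major scatter into a mutable accumulator (objective: idiomatic).

-- ===== PORT A =====
def column_histogram (binary_img : List (List Int)) : List Int :=
  let h : Int := binary_img.length
  if h = 0 then []
  else
    let w : Int := (binary_img.headD []).length
    let hist := List.replicate w.toNat (0 : Int)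
    (PySem.List.pyRange 0 h 1).foldl (fun hist y =>
      let row := PySem.List.pyGetD binary_img y []
      (PySem.List.pyRange 0 w 1).foldl (fun hist x =>
        if PySem.List.pyGetD row x 0 ≠ 0 then
          PySem.List.pySetD hist x (PySem.List.pyGetD hist x 0 + 1)
        else hist) hist) hist

-- ===== PORT B =====
-- zip(*rows): repeatedly take the heads until some row is exhausted (hand port, exact for lists of lists)
def pvZipStar (rows : List (List Int)) : List (List Int) :=
  if rows.isEmpty then []
  else if rows.any (·.isEmpty) then []
  else (rows.map (fun r => r.headD 0)) :: pvZipStar (rows.map (·.tail))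
termination_by (rows.headD []).length
decreasing_by
  rcases rows with _ | ⟨r, rs⟩
  · simp_all
  · rcases r with _ | ⟨a, t⟩ <;> simp_all

def column_histogram_alt (binary_img : List (List Int)) : List Int :=
  (pvZipStar binary_img).map (fun col =>
    col.foldl (fun acc v => if v ≠ 0 then acc + 1 else acc) 0)

-- ===== PRECONDITION & SPEC =====
-- Pre_ excludes exactly the ragged images on which A raises IndexError (some row shorter than the first row).
def Pre_column_histogram (binary_img : List (List Int)) : Prop :=
  ∀ r ∈ binary_img, (binary_img.headD []).length ≤ r.length
instance (binary_img : List (List Int)) : Decidable (Pre_column_histogram binary_img) := by unfold Pre_column_histogram; infer_instance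
def pvWitness_column_histogram : List (List Int) := [[1, 0], [0, 1]]

def Spec_column_histogram (binary_img : List (List Int)) (out : List Int) : Prop := out = column_histogram_alt binary_img
instance (binary_img : List (List Int)) (out : List Int) : Decidable (Spec_column_histogram binary_img out) := by unfold Spec_column_histogram; infer_instance

-- ===== CLAIM (what is proved, stated in full; the proofs are below) =====
def Claim_equal_column_histogram : Prop := ∀ (binary_img : List (List Int)), Dom_column_histogram binary_img → Pre_column_histogram binary_img → Spec_column_histogram binary_img (column_histogram binary_img)

-- ===== LEMMAS AND PROOFS =====
def pvG (row : List Int) (hist : List Int) (k : Nat) : List Int :=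
  if row.getD k 0 ≠ 0 then hist.set k (hist.getD k 0 + 1) else hist

def pvCnt (rows : List (List Int)) (x : Nat) : Int :=
  (rows.countP (fun r => decide (r.getD x 0 ≠ 0)) : Nat)

lemma cnt_fold (rows : List (List Int)) (x : Nat) (a : Int) :
    rows.foldl (fun a r => if r.getD x 0 ≠ 0 then a + 1 else a) a = a + pvCnt rows x := by
  simpa [pvCnt] using PySem.List.foldl_count_if (fun r => decide (r.getD x 0 ≠ 0)) rows a

lemma inner_eq (row : List Int) (w : Nat) (hist : List Int) :
    (PySem.List.pyRange 0 (w : Int) 1).foldl (fun hist x =>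
        if PySem.List.pyGetD row x 0 ≠ 0 then
          PySem.List.pySetD hist x (PySem.List.pyGetD hist x 0 + 1)
        else hist) hist
      = (List.range w).foldl (pvG row) hist := by
  rw [PySem.List.pyRange_one, List.foldl_map]
  apply PySem.List.foldl_congr_mem
  intro acc x hx
  simp [pvG, PySem.List.pyGetD_natCast, PySem.List.pySetD_natCast]

lemma pvG_length (row : List Int) (hist : List Int) (j : Nat) :
    (pvG row hist j).length = hist.length := by
  unfold pvG; split <;> simp

lemma foldl_g_length (row : List Int) (l : List Nat) (hist : List Int) :
    (l.foldl (pvG row) hist).length = hist.length := by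
  induction l generalizing hist with
  | nil => rfl
  | cons j t ih => rw [List.foldl_cons, ih, pvG_length]

lemma foldl_g_getD (row : List Int) (l : List Nat) (hnd : l.Nodup) (hist : List Int)
    (k : Nat) (hk : k < hist.length) :
    (l.foldl (pvG row) hist).getD k 0
      = hist.getD k 0 + (if k ∈ l ∧ row.getD k 0 ≠ 0 then 1 else 0) := by
  induction l generalizing hist with
  | nil => simp
  | cons j t ih =>
    rw [List.foldl_cons,
      ih (List.nodup_cons.mp hnd).2 (pvG row hist j) ((pvG_length row hist j) ▸ hk)]
    rcases eq_or_ne j k with hjk | hjk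
    · subst hjk
      have hkt : j ∉ t := (List.nodup_cons.mp hnd).1
      unfold pvG
      split
      · rename_i hrow
        have h1 : (hist.set j (hist.getD j 0 + 1)).getD j 0 = hist.getD j 0 + 1 := by
          rw [List.getD_eq_getElem _ _ (by simpa using hk)]
          simp
        rw [h1, if_neg (fun h => hkt h.1), if_pos ⟨List.mem_cons_self, hrow⟩]
        ring
      · rename_i hrow
        rw [if_neg (fun h => hrow h.2), if_neg (fun h => hrow h.2)]
    · have hun : (pvG row hist j).getD k 0 = hist.getD k 0 := by
        unfold pvG; split
        · rw [List.getD_eq_getElem _ _ (by simpa using hk), List.getD_eq_getElem _ _ hk]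
          simp [hjk]
        · rfl
      rw [hun]
      have : (k ∈ j :: t) ↔ (k ∈ t) := by simp [List.mem_cons, Ne.symm hjk]
      rw [if_congr (and_congr_left' this) rfl rfl]

lemma outer_eq (w : Nat) (rows : List (List Int)) (hist : List Int) (hw : hist.length = w) :
    rows.foldl (fun hist row => (List.range w).foldl (pvG row) hist) hist
      = (List.range w).map (fun x => hist.getD x 0 + pvCnt rows x) := by
  induction rows generalizing hist with
  | nil =>
    simp only [List.foldl_nil]
    apply List.ext_getElem (by simp [hw])
    intro i h1 h2
    simp [pvCnt, List.getD, List.getElem?_eq_getElem h1]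
  | cons r rs ih =>
    rw [List.foldl_cons, ih _ (by rw [foldl_g_length, hw])]
    apply List.map_congr_left
    intro x hx
    have hxw : x < w := List.mem_range.mp hx
    rw [foldl_g_getD r _ (List.nodup_range) hist x (by omega)]
    simp only [List.mem_range, hxw, true_and, pvCnt, List.countP_cons]
    by_cases hr : r.getD x 0 ≠ 0 <;> simp <;> ring

lemma A_eq (img : List (List Int)) :
    column_histogram img =
      if img.length = 0 then [] else
      img.foldl (fun hist row => (List.range (img.headD []).length).foldl (pvG row) hist)
        (List.replicate (img.headD []).length (0 : Int)) := by
  unfold column_histogram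
  by_cases h0 : img.length = 0
  · simp [h0]
  · have h' : (img.length : Int) ≠ 0 := by exact_mod_cast h0
    simp only [h0, h', if_false]
    rw [show ((img.length : Int)) = PySem.List.len img from rfl]
    rw [PySem.List.foldl_pyRange_zero_pyGetD img ([] : List Int)
      (fun hist row => (PySem.List.pyRange 0 ((img.headD []).length : Int) 1).foldl (fun hist x =>
        if PySem.List.pyGetD row x 0 ≠ 0 then
          PySem.List.pySetD hist x (PySem.List.pyGetD hist x 0 + 1)
        else hist) hist)]
    simp only [inner_eq, Int.toNat_natCast]

lemma headD_getD (r : List Int) : r.head?.getD 0 = r[0]?.getD 0 := by cases r <;> rfl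

lemma zipStar_spec (n : Nat) : ∀ rows : List (List Int), rows ≠ [] →
    (rows.headD []).length = n → (∀ r ∈ rows, n ≤ r.length) →
    pvZipStar rows = (List.range n).map (fun x => rows.map (fun r => r.getD x 0)) := by
  induction n with
  | zero =>
    rintro (_ | ⟨r, rs⟩) hne hh _
    · exact absurd rfl hne
    · have hr0 : r = [] := by
        simp only [List.headD_cons] at hh
        exact List.length_eq_zero_iff.mp hh
      subst hr0
      rw [pvZipStar]
      simp
  | succ n ih =>
    rintro (_ | ⟨r, rs⟩) hne hh hall
    · exact absurd rfl hne
    · rw [pvZipStar]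
      have hrne : r ≠ [] := by
        intro h; subst h; simp at hh
      have hnone : ((r :: rs).any (·.isEmpty)) = false := by
        rw [List.any_eq_false]
        intro s hs
        have hlen := hall s hs
        rcases s with _ | ⟨a, t⟩
        · simp at hlen
        · simp
      simp only [List.isEmpty_cons, Bool.false_eq_true, if_false, hnone, if_false]
      rw [ih ((r :: rs).map (·.tail)) (by simp)
        (by simp only [List.headD_cons] at hh
            simp only [List.map_cons, List.headD_cons, List.length_tail]
            omega)
        (by intro s hs
            rw [List.mem_map] at hs
            obtain ⟨u, hu, rfl⟩ := hs
            have := hall u hu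
            simp only [List.length_tail]
            omega)]
      rw [List.range_succ_eq_map]
      simp only [List.map_cons, List.map_map]
      congr 1
      · simp [headD_getD]
      · apply List.map_congr_left
        intro x hx
        simp [Function.comp, Nat.succ_eq_add_one]

-- ===== VERDICT (by name: the statement is the Claim_ definition above) =====
theorem column_histogram_spec : Claim_equal_column_histogram := by
  intro img _ hpre
  unfold Spec_column_histogram
  rcases img with _ | ⟨r, rs⟩
  · rw [A_eq]
    simp only [List.length_nil, reduceIte]
    unfold column_histogram_alt
    rw [pvZipStar]
    simp
  · have hA : column_histogram (r :: rs) = (List.range r.length).map (fun x => pvCnt (r :: rs) x) := by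
      rw [A_eq]
      simp only [List.length_cons, List.headD_cons, Nat.succ_ne_zero, if_false]
      rw [outer_eq r.length _ _ (by simp)]
      apply List.map_congr_left
      intro x hx
      have hz : (List.replicate r.length (0 : Int)).getD x 0 = 0 := by
        simp [List.getD]
      rw [hz, zero_add]
    have hB : column_histogram_alt (r :: rs) = (List.range r.length).map (fun x => pvCnt (r :: rs) x) := by
      unfold column_histogram_alt
      rw [zipStar_spec r.length (r :: rs) (by simp) (by simp)
        (fun s hs => by simpa using hpre s hs)]
      rw [List.map_map]
      apply List.map_congr_left
      intro x hx
      simp only [Function.comp]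
      rw [List.foldl_map, cnt_fold, zero_add]
    rw [hA, hB]
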